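-- pv_equiv track=rewrite | github.com/hejian0818/ck | app/services/cleanarch/cdt_adapter.py | _brace_delta
-- ===== SOURCE A (Python) =====
-- def _brace_delta(text: str) -> int:
--     depth = 0
--     quote: str | None = None
--     escaped = False
--     in_line_comment = False
--     in_block_comment = False
--     for index, char in enumerate(text):
--         next_char = text[index + 1] if index + 1 < len(text) else ""
--         if in_line_comment:
--             if char == "\n":
--                 in_line_comment = False
--             continue
--         if in_block_comment:
--             if char == "*" and next_char == "/":
--                 in_block_comment = False
--             continue
--         if quote:
--             if escaped:
--                 escaped = False
--             elif char == "\\":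
--                 escaped = True
--             elif char == quote:
--                 quote = None
--             continue
--         if char == "/" and next_char == "/":
--             in_line_comment = True
--         elif char == "/" and next_char == "*":
--             in_block_comment = True
--         elif char in {"'", '"'}:
--             quote = char
--         elif char == "{":
--             depth += 1
--         elif char == "}":
--             depth -= 1
--     return depth
-- ===== SOURCE B (Python) =====
-- def _brace_delta(text: str) -> int:
--     depth = 0
--     i = 0
--     n = len(text)
--     while i < n:
--         c = text[i]
--         if c == "/" and i + 1 < n and text[i + 1] == "/":
--             j = text.find("\n", i + 2)
--             if j == -1:
--                 return depth
--             i = j + 1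
--         elif c == "/" and i + 1 < n and text[i + 1] == "*":
--             j = text.find("*/", i + 1)
--             if j == -1:
--                 return depth
--             i = j + 1  # resume at the '/' of '*/', which is re-dispatched
--         elif c in ("'", '"'):
--             i += 1
--             while i < n:
--                 if text[i] == "\\":
--                     i += 2
--                 elif text[i] == c:
--                     i += 1
--                     break
--                 else:
--                     i += 1
--         elif c == "{":
--             depth += 1
--             i += 1
--         elif c == "}":
--             depth -= 1
--             i += 1
--         else:
--             i += 1
--     return depth
-- ===== Notes on version B (the rewrite author's own statement) =====
-- stated objective: alternative
-- what changed: Replaced the per-character for loop carrying five state flags (quote/escaped/line-comment/block-comment) by an index-driven scanner that dispatches on the current and next character and consumes each comment or string span wholesale with an inner scan (str.find / escape-aware skip), keeping only depth and the position.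
import Mathlib
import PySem

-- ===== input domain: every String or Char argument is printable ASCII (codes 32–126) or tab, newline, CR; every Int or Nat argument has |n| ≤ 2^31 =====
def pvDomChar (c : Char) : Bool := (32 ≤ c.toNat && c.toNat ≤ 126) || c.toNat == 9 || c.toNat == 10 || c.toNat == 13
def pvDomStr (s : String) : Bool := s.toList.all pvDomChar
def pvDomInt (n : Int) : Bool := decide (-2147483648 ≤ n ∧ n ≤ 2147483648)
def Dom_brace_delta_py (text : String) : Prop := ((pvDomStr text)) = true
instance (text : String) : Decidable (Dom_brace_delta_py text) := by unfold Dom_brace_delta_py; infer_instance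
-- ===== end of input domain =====

-- B replaces A's per-character loop carrying quote/escaped/comment flags by an index-driven
-- scanner that consumes whole comment/string spans with inner scans; same return value (alternative decomposition).

-- ===== PORT A =====
-- per-character loop over (depth, quote, escaped, in_line_comment, in_block_comment);
-- next_char = rest.head? models text[index+1] (none = "").
def bdALoop (depth : Int) (quote : Option Char) (escaped : Bool)
    (inLine : Bool) (inBlock : Bool) : List Char → Int
  | [] => depth
  | c :: rest =>
    let next := rest.head?
    if inLine then
      bdALoop depth quote escaped (if c = '\n' then false else inLine) inBlock rest
    else if inBlock then
      bdALoop depth quote escaped inLine (if c = '*' ∧ next = some '/' then false else inBlock) rest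
    else if quote.isSome then
      if escaped then bdALoop depth quote false inLine inBlock rest
      else if c = '\\' then bdALoop depth quote true inLine inBlock rest
      else if some c = quote then bdALoop depth none escaped inLine inBlock rest
      else bdALoop depth quote escaped inLine inBlock rest
    else if c = '/' ∧ next = some '/' then bdALoop depth quote escaped true inBlock rest
    else if c = '/' ∧ next = some '*' then bdALoop depth quote escaped inLine true rest
    else if c = '\'' ∨ c = '"' then bdALoop depth (some c) escaped inLine inBlock rest
    else if c = '{' then bdALoop (depth + 1) quote escaped inLine inBlock rest
    else if c = '}' then bdALoop (depth - 1) quote escaped inLine inBlock rest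
    else bdALoop depth quote escaped inLine inBlock rest

def brace_delta_py (text : String) : Int :=
  bdALoop 0 none false false false text.toList

-- ===== PORT B =====
-- inner scan for a line comment: skip to just after the next '\n' ([] if unterminated)
def bdSkipLine : List Char → List Char
  | [] => []
  | c :: rest => if c = '\n' then rest else bdSkipLine rest

-- inner scan for a block comment: skip to the '/' of the next "*/" (the '/' is re-dispatched;
-- [] if unterminated)
def bdSkipBlock : List Char → List Char
  | [] => []
  | c :: rest => if c = '*' ∧ rest.head? = some '/' then rest else bdSkipBlock rest

-- inner scan for a quoted span: a backslash consumes the following char ([] if unterminated)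
def bdSkipQuote (q : Char) : List Char → List Char
  | [] => []
  | c :: rest =>
    if c = '\\' then
      match rest with
      | [] => []
      | _ :: t => bdSkipQuote q t
    else if c = q then rest else bdSkipQuote q rest

theorem bdSkipLine_len (l : List Char) : (bdSkipLine l).length ≤ l.length := by
  induction l with
  | nil => simp [bdSkipLine]
  | cons c rest ih => simp only [bdSkipLine]; split; · simp
                      · simpa using Nat.le_succ_of_le ih

theorem bdSkipBlock_len (l : List Char) : (bdSkipBlock l).length ≤ l.length := by
  induction l with
  | nil => simp [bdSkipBlock]
  | cons c rest ih => simp only [bdSkipBlock]; split; · simp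
                      · simpa using Nat.le_succ_of_le ih

theorem bdSkipQuote_nil (q : Char) : bdSkipQuote q [] = [] := by
  rw [bdSkipQuote.eq_def]

theorem bdSkipQuote_cons' (q c : Char) (rest : List Char) :
    bdSkipQuote q (c :: rest) =
      if c = '\\' then
        (match rest with
         | [] => []
         | _ :: t => bdSkipQuote q t)
      else if c = q then rest else bdSkipQuote q rest := by
  rw [bdSkipQuote.eq_def]

theorem bdSkipQuote_lenAux (q : Char) : ∀ (n : Nat) (l : List Char), l.length ≤ n →
    (bdSkipQuote q l).length ≤ l.length := by
  intro n
  induction n with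
  | zero =>
    intro l hl
    cases l with
    | nil => simp [bdSkipQuote_nil]
    | cons c rest => simp at hl
  | succ n ih =>
    intro l hl
    cases l with
    | nil => simp [bdSkipQuote_nil]
    | cons c rest =>
      rw [bdSkipQuote_cons']
      by_cases hc : c = '\\'
      · rw [if_pos hc]
        cases rest with
        | nil => simp
        | cons x t =>
          have := ih t (by simp at hl; omega)
          simp; omega
      · rw [if_neg hc]
        by_cases hq : c = q
        · rw [if_pos hq]; simp
        · rw [if_neg hq]
          have := ih rest (by simp at hl; omega)
          simp; omega

theorem bdSkipQuote_len (q : Char) (l : List Char) : (bdSkipQuote q l).length ≤ l.length :=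
  bdSkipQuote_lenAux q l.length l le_rfl

-- main loop: dispatch on the current (and next) character, consuming whole spans
def bdBLoop (depth : Int) : List Char → Int
  | [] => depth
  | c :: rest =>
    if c = '/' ∧ rest.head? = some '/' then bdBLoop depth (bdSkipLine rest.tail)
    else if c = '/' ∧ rest.head? = some '*' then bdBLoop depth (bdSkipBlock rest)
    else if c = '\'' ∨ c = '"' then bdBLoop depth (bdSkipQuote c rest)
    else if c = '{' then bdBLoop (depth + 1) rest
    else if c = '}' then bdBLoop (depth - 1) rest
    else bdBLoop depth rest
termination_by l => l.length
decreasing_by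
  · have h1 := bdSkipLine_len rest.tail
    have h2 : rest.tail.length ≤ rest.length := by cases rest <;> simp
    simp only [List.length_cons]; omega
  · have := bdSkipBlock_len rest; simp only [List.length_cons]; omega
  · have := bdSkipQuote_len c rest; simp only [List.length_cons]; omega
  · simp only [List.length_cons]; omega
  · simp only [List.length_cons]; omega
  · simp only [List.length_cons]; omega

def brace_delta_py_alt (text : String) : Int :=
  bdBLoop 0 text.toList

-- ===== PRECONDITION & SPEC =====
def Spec_brace_delta_py (text : String) (out : Int) : Prop := out = brace_delta_py_alt text
instance (text : String) (out : Int) : Decidable (Spec_brace_delta_py text out) := by unfold Spec_brace_delta_py; infer_instance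

-- ===== CLAIM (what is proved, stated in full; the proofs are below) =====
def Claim_equal_brace_delta_py : Prop := ∀ (text : String), Dom_brace_delta_py text → Spec_brace_delta_py text (brace_delta_py text)

-- ===== LEMMAS AND PROOFS =====
theorem bdLine_bridge (depth : Int) (l : List Char) :
    bdALoop depth none false true false l = bdALoop depth none false false false (bdSkipLine l) := by
  induction l with
  | nil => rfl
  | cons c rest ih =>
    by_cases h : c = '\n' <;> simp [bdALoop, bdSkipLine, h, ih]

theorem bdBlock_bridge (depth : Int) (l : List Char) :
    bdALoop depth none false false true l = bdALoop depth none false false false (bdSkipBlock l) := by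
  induction l with
  | nil => rfl
  | cons c rest ih =>
    by_cases h : c = '*' ∧ rest.head? = some '/' <;> simp [bdALoop, bdSkipBlock, h, ih]

theorem bdQuote_bridgeAux (depth : Int) (q : Char) : ∀ (n : Nat) (l : List Char), l.length ≤ n →
    bdALoop depth (some q) false false false l = bdALoop depth none false false false (bdSkipQuote q l) := by
  intro n
  induction n with
  | zero =>
    intro l hl
    cases l with
    | nil => simp [bdALoop, bdSkipQuote_nil]
    | cons c rest => simp at hl
  | succ n ih =>
    intro l hl
    cases l with
    | nil => simp [bdALoop, bdSkipQuote_nil]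
    | cons c rest =>
      by_cases hc : c = '\\'
      · subst hc
        cases rest with
        | nil => simp [bdALoop, bdSkipQuote_cons']
        | cons x t =>
          have := ih t (by simp at hl; omega)
          simp [bdALoop, bdSkipQuote_cons', this]
      · by_cases hq : c = q
        · subst hq
          simp [bdALoop, bdSkipQuote_cons', hc]
        · have := ih rest (by simp at hl; omega)
          simp [bdALoop, bdSkipQuote_cons', hc, hq, this]

theorem bdQuote_bridge (depth : Int) (q : Char) (l : List Char) :
    bdALoop depth (some q) false false false l = bdALoop depth none false false false (bdSkipQuote q l) :=
  bdQuote_bridgeAux depth q l.length l le_rfl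

theorem bdMainAux : ∀ (n : Nat) (l : List Char), l.length ≤ n → ∀ depth : Int,
    bdALoop depth none false false false l = bdBLoop depth l := by
  intro n
  induction n with
  | zero =>
    intro l hl depth
    cases l with
    | nil => simp [bdALoop, bdBLoop]
    | cons c rest => simp at hl
  | succ n ih =>
    intro l hl depth
    cases l with
    | nil => simp [bdALoop, bdBLoop]
    | cons c rest =>
      have hrest : rest.length ≤ n := by simpa using hl
      by_cases h1 : c = '/' ∧ rest.head? = some '/'
      · obtain ⟨hc, hr⟩ := h1
        subst hc
        cases rest with
        | nil => simp at hr
        | cons c2 t =>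
          have hc2 : c2 = '/' := by simpa using hr
          subst hc2
          have hlen : (bdSkipLine t).length ≤ n := le_trans (bdSkipLine_len t) (by simp at hrest; omega)
          have e1 : bdALoop depth none false false false ('/' :: '/' :: t)
              = bdALoop depth none false true false t := by simp [bdALoop]
          have e2 : bdBLoop depth ('/' :: '/' :: t) = bdBLoop depth (bdSkipLine t) := by
            simp [bdBLoop]
          rw [e1, bdLine_bridge, ih _ hlen depth, e2]
      · by_cases h2 : c = '/' ∧ rest.head? = some '*'
        · obtain ⟨hc, hr⟩ := h2
          subst hc
          have hlen : (bdSkipBlock rest).length ≤ n := le_trans (bdSkipBlock_len rest) hrest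
          have e1 : bdALoop depth none false false false ('/' :: rest)
              = bdALoop depth none false false true rest := by simp [bdALoop, hr]
          have e2 : bdBLoop depth ('/' :: rest) = bdBLoop depth (bdSkipBlock rest) := by
            simp [bdBLoop, hr]
          rw [e1, bdBlock_bridge, ih _ hlen depth, e2]
        · by_cases h3 : c = '\'' ∨ c = '"'
          · have hlen : (bdSkipQuote c rest).length ≤ n := le_trans (bdSkipQuote_len c rest) hrest
            have hstep : bdALoop depth none false false false (c :: rest)
                = bdALoop depth (some c) false false false rest := by
              rcases h3 with h | h <;> subst h <;> simp [bdALoop]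
            have hns : ¬ (c = '/') := by rcases h3 with h | h <;> subst h <;> decide
            have e2 : bdBLoop depth (c :: rest) = bdBLoop depth (bdSkipQuote c rest) := by
              simp [bdBLoop, h3, hns]
            rw [hstep, bdQuote_bridge, ih _ hlen depth, e2]
          · by_cases h4 : c = '{'
            · subst h4
              simp [bdALoop, bdBLoop, ih rest hrest (depth + 1)]
            · by_cases h5 : c = '}'
              · subst h5
                simp [bdALoop, bdBLoop, ih rest hrest (depth - 1)]
              · simp [bdALoop, bdBLoop, h1, h2, h3, h4, h5, ih rest hrest depth]

-- ===== VERDICT (by name: the statement is the Claim_ definition above) =====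
theorem brace_delta_py_spec : Claim_equal_brace_delta_py := by
  intro text _
  unfold Spec_brace_delta_py brace_delta_py brace_delta_py_alt
  exact bdMainAux text.toList.length text.toList le_rfl 0
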